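-- pv_equiv track=rewrite | github.com/arXiv/student-projects | public-usage-project/app/download_data.py | split_csv_montly
-- ===== SOURCE A (Python) =====
-- def split_csv_montly(csv_data, date):
--     """
--     Gives back only new entries that we do not have in the database for month
--     Args:
--         csv_data: string of the csv data
--         date: the most recent date str
--
--     Returns:
--         None if no new entries
--         All new entries in lines of csv file
--
--     """
--     csv_data = csv_data.splitlines()
--     date = date[:7]
--     length = len(csv_data)
--     start = csv_data[:1]
--     for n in range(1,length):
--         if csv_data[length - n].split(',')[0] == date:
--             #return all after that date
--
--             start.extend(csv_data[(length - n + 1):])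
--
--             return start
--     return None
-- ===== SOURCE B (Python) =====
-- def split_csv_montly(csv_data, date):
--     lines = csv_data.splitlines()
--     last_by_key = {}
--     for i in range(1, len(lines)):
--         last_by_key[lines[i].split(',')[0]] = i
--     idx = last_by_key.get(date[:7])
--     if idx is None:
--         return None
--     return lines[:1] + lines[idx + 1:]
-- ===== Notes on version B (the rewrite author's own statement) =====
-- stated objective: alternative
-- what changed: Builds a dictionary index mapping each line's first CSV field to its last line index (dict overwrite keeps the last one), then answers with a single dictionary lookup of the month instead of scanning for a match.
import Mathlib
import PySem

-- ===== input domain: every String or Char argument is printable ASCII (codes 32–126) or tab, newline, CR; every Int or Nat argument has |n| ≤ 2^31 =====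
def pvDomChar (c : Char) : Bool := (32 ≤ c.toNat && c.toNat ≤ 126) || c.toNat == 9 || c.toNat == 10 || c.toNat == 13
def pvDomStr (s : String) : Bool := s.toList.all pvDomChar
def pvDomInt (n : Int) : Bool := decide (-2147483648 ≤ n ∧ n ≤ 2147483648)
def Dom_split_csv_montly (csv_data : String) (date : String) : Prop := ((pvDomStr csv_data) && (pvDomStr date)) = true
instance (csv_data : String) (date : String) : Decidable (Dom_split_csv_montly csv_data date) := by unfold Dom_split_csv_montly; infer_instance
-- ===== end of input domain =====

-- B replaces A's backward match-scan by a dictionary index (first field -> last line index) built in one pass, answered by a single lookup (alternative decomposition, same cost).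

-- ===== PORT A =====
-- backward scan: for n in range(1, length), test index length-n, return on first hit
def split_csv_montly (csv_data : String) (date : String) : Option (List String) :=
  let lines := PySem.Str.splitlines csv_data
  let date7 := PySem.Str.slice date none (some 7)
  let length : Int := PySem.List.len lines
  let start := PySem.List.slice lines none (some 1)
  match (PySem.List.pyRange 1 length 1).find?
      (fun n => PySem.List.pyGetD ((PySem.Str.split? (PySem.List.pyGetD lines (length - n) "") ",").getD []) 0 "" == date7) with
  | some n => some (start ++ PySem.List.slice lines (some (length - n + 1)) none)
  | none => none

-- ===== PORT B =====
-- one pass building last_by_key : first CSV field -> last index carrying it (dict overwrite), then one lookup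
def split_csv_montly_alt (csv_data : String) (date : String) : Option (List String) :=
  let lines := PySem.Str.splitlines csv_data
  let last_by_key : PySem.Dict String Int :=
    (PySem.List.pyRange 1 (PySem.List.len lines) 1).foldl
      (fun d i => d.insert (PySem.List.pyGetD ((PySem.Str.split? (PySem.List.pyGetD lines i "") ",").getD []) 0 "") i)
      PySem.Dict.empty
  match last_by_key.get? (PySem.Str.slice date none (some 7)) with
  | some i => some (PySem.List.slice lines none (some 1) ++ PySem.List.slice lines (some (i + 1)) none)
  | none => none

-- ===== PRECONDITION & SPEC =====
def Spec_split_csv_montly (csv_data : String) (date : String) (out : Option (List String)) : Prop := out = split_csv_montly_alt csv_data date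
instance (csv_data : String) (date : String) (out : Option (List String)) : Decidable (Spec_split_csv_montly csv_data date out) := by unfold Spec_split_csv_montly; infer_instance

-- ===== CLAIM (what is proved, stated in full; the proofs are below) =====
def Claim_equal_split_csv_montly : Prop := ∀ (csv_data : String) (date : String), Dom_split_csv_montly csv_data date → Spec_split_csv_montly csv_data date (split_csv_montly csv_data date)

-- ===== LEMMAS AND PROOFS =====

-- the month's entry of the insert-loop dict is the last index whose key matches
theorem get?_foldl_insert_key (k : Int → String) (l : List Int) (d : PySem.Dict String Int) (m : String) :
    (l.foldl (fun d i => d.insert (k i) i) d).get? m =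
      l.foldl (fun acc i => if k i == m then some i else acc) (d.get? m) := by
  induction l generalizing d with
  | nil => rfl
  | cons x t ih =>
    simp only [List.foldl_cons, ih]
    congr 1
    rw [PySem.Dict.get?_insert]
    by_cases h : m = k x
    · simp [h]
    · have hb : (k x == m) = false := beq_eq_false_iff_ne.mpr (fun e => h e.symm)
      simp [h, hb]

-- keep-the-last fold over a list is the first match of the reversed list
theorem foldl_last_eq_find_reverse {α : Type} (p : α → Bool) (l : List α) (acc : Option α) :
    l.foldl (fun a i => if p i then some i else a) acc =
      match l.reverse.find? p with | some x => some x | none => acc := by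
  induction l generalizing acc with
  | nil => simp
  | cons x t ih =>
    simp only [List.foldl_cons, List.reverse_cons, List.find?_append, ih]
    cases t.reverse.find? p with
    | some y => simp
    | none => by_cases h : p x <;> simp [h, List.find?]

-- the indices A visits (length-n for n in range(1,length)) are B's indices reversed
theorem map_sub_pyRange (L : Int) :
    (PySem.List.pyRange 1 L 1).map (fun n => L - n) = (PySem.List.pyRange 1 L 1).reverse := by
  have h1 : PySem.List.pyRange (L - 1) 0 (-1) = (PySem.List.pyRange 1 L 1).reverse := by
    rw [PySem.List.pyRange_neg_one_eq_reverse]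
    norm_num
  rw [← h1, PySem.List.pyRange_one, PySem.List.pyRange_neg_one, List.map_map]
  have h2 : L - 1 - 0 = L - 1 := by ring
  rw [h2]
  exact List.map_congr_left (fun k _ => by simp [Function.comp]; ring)

-- B's keep-the-last scan equals A's find? with the found index translated by n ↦ L - n
theorem scan_eq (p : Int → Bool) (L : Int) :
    (PySem.List.pyRange 1 L 1).foldl (fun acc i => if p i then some i else acc) none =
      Option.map (fun n => L - n) ((PySem.List.pyRange 1 L 1).find? (fun n => p (L - n))) := by
  rw [foldl_last_eq_find_reverse, ← map_sub_pyRange L, List.find?_map]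
  have hc : (p ∘ fun n => L - n) = fun n => p (L - n) := rfl
  rw [hc]
  cases (PySem.List.pyRange 1 L 1).find? (fun n => p (L - n)) <;> rfl

-- both ports, with the per-line key abstracted as k; A finds the match from the back, B looks the month up in the index dict
theorem ports_eq (lines : List String) (k : Int → String) (m : String) :
    (match (PySem.List.pyRange 1 (PySem.List.len lines) 1).find?
        (fun n => k (PySem.List.len lines - n) == m) with
     | some n => some (PySem.List.slice lines none (some 1) ++
                       PySem.List.slice lines (some (PySem.List.len lines - n + 1)) none)
     | none => none)
    = (match ((PySem.List.pyRange 1 (PySem.List.len lines) 1).foldl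
          (fun d i => d.insert (k i) i) PySem.Dict.empty).get? m with
       | some i => some (PySem.List.slice lines none (some 1) ++
                         PySem.List.slice lines (some (i + 1)) none)
       | none => none) := by
  rw [get?_foldl_insert_key, PySem.Dict.get?_empty,
    scan_eq (fun i => k i == m) (PySem.List.len lines)]
  cases (PySem.List.pyRange 1 (PySem.List.len lines) 1).find?
      (fun n => k (PySem.List.len lines - n) == m) <;> rfl

-- ===== VERDICT (by name: the statement is the Claim_ definition above) =====
theorem split_csv_montly_spec : Claim_equal_split_csv_montly := by
  intro csv_data date _
  unfold Spec_split_csv_montly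
  exact ports_eq (PySem.Str.splitlines csv_data)
    (fun i => PySem.List.pyGetD ((PySem.Str.split? (PySem.List.pyGetD (PySem.Str.splitlines csv_data) i "") ",").getD []) 0 "")
    (PySem.Str.slice date none (some 7))
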